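-- pv_equiv track=rewrite | github.com/burlin/ftrack_inout | browser/browser_widget_optimized.py | _frame_range_from_names
-- ===== SOURCE A (Python) =====
-- def _frame_range_from_names(names):
--     """Return (frame_min, frame_max) from list of name strings (frame numbers), or (None, None)."""
--     if not names:
--         return None, None
--     frames = []
--     for name in names:
--         if name is None:
--             continue
--         try:
--             frames.append(int(name))
--         except (ValueError, TypeError):
--             continue
--     if not frames:
--         return None, None
--     return min(frames), max(frames)
-- ===== SOURCE B (Python) =====
-- def _frame_range_from_names(names):
--     """Return (frame_min, frame_max) from list of name strings (frame numbers), or (None, None)."""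
--     mm = None
--     for name in names:
--         if name is None:
--             continue
--         try:
--             v = int(name)
--         except (ValueError, TypeError):
--             continue
--         if mm is None:
--             mm = (v, v)
--         else:
--             mm = (min(mm[0], v), max(mm[1], v))
--     if mm is None:
--         return None, None
--     return mm
-- ===== Notes on version B (the rewrite author's own statement) =====
-- stated objective: simpler
-- what changed: Single streaming pass maintaining a running (min,max) pair instead of building an intermediate list and scanning it twice with min() and max(); the empty-input early return disappears.
import Mathlib
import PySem

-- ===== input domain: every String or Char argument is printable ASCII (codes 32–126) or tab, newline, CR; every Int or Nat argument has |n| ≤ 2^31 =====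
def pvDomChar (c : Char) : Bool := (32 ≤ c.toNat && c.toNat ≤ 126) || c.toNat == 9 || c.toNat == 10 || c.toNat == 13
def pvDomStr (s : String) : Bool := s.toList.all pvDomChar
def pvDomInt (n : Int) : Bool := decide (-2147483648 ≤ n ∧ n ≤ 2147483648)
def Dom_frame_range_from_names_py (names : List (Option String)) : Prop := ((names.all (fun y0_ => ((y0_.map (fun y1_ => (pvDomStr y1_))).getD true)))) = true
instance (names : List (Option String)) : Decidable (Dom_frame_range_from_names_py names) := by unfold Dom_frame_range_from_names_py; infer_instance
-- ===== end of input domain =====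

-- B replaces A's intermediate list plus separate min() and max() scans by one
-- streaming fold over a running (min, max) pair: objective 'simpler' (one pass, O(1) extra space).

-- ===== PORT A =====
def frame_range_from_names_py (names : List (Option String)) : Option Int × Option Int :=
  if names = [] then (none, none)
  else
    -- frames = []; loop appending int(name), skipping None / unparseable
    let frames : List Int := names.foldl (fun frames name =>
      match name with
      | none => frames
      | some s =>
        match PySem.Int.ofStr? s with
        | none => frames
        | some v => frames ++ [v]) []
    if frames = [] then (none, none)
    else (PySem.List.min? frames (fun x => x), PySem.List.max? frames (fun x => x))

-- ===== PORT B =====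
def frame_range_from_names_py_alt (names : List (Option String)) : Option Int × Option Int :=
  let mm : Option (Int × Int) := names.foldl (fun mm name =>
    match name with
    | none => mm
    | some s =>
      match PySem.Int.ofStr? s with
      | none => mm
      | some v =>
        match mm with
        | none => some (v, v)
        | some (a, b) => some (min a v, max b v)) none
  match mm with
  | none => (none, none)
  | some (a, b) => (some a, some b)

-- ===== PRECONDITION & SPEC =====
def Spec_frame_range_from_names_py (names : List (Option String)) (out : Option Int × Option Int) : Prop := out = frame_range_from_names_py_alt names
instance (names : List (Option String)) (out : Option Int × Option Int) : Decidable (Spec_frame_range_from_names_py names out) := by unfold Spec_frame_range_from_names_py; infer_instance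

-- ===== CLAIM (what is proved, stated in full; the proofs are below) =====
def Claim_equal_frame_range_from_names_py : Prop := ∀ (names : List (Option String)), Dom_frame_range_from_names_py names → Spec_frame_range_from_names_py names (frame_range_from_names_py names)

-- ===== LEMMAS AND PROOFS =====

-- the parsed values, in order
def pvVals (names : List (Option String)) : List Int :=
  names.filterMap (fun o => o.bind PySem.Int.ofStr?)

theorem pvVals_cons (n : Option String) (t : List (Option String)) :
    pvVals (n :: t) = (match n.bind PySem.Int.ofStr? with
      | none => pvVals t
      | some v => v :: pvVals t) := by
  cases h : n.bind PySem.Int.ofStr? <;> simp [pvVals, h]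

-- A's loop builds exactly pvVals
theorem frames_eq_vals (names : List (Option String)) (acc : List Int) :
    names.foldl (fun frames name =>
      match name with
      | none => frames
      | some s =>
        match PySem.Int.ofStr? s with
        | none => frames
        | some v => frames ++ [v]) acc = acc ++ pvVals names := by
  induction names generalizing acc with
  | nil => simp [pvVals]
  | cons n t ih =>
    cases n with
    | none => simpa [pvVals_cons] using ih acc
    | some s =>
      cases h : PySem.Int.ofStr? s with
      | none => simp [List.foldl, h, ih acc, pvVals_cons]
      | some v => simp [List.foldl, h, ih (acc ++ [v]), pvVals_cons]

-- B's fold from a set state computes running min/max over the parsed values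
theorem bfold_some (names : List (Option String)) (a b : Int) :
    names.foldl (fun mm name =>
      match name with
      | none => mm
      | some s =>
        match PySem.Int.ofStr? s with
        | none => mm
        | some v =>
          match mm with
          | none => some (v, v)
          | some (a, b) => some (min a v, max b v)) (some (a, b)) =
      some ((pvVals names).foldl min a, (pvVals names).foldl max b) := by
  induction names generalizing a b with
  | nil => simp [pvVals]
  | cons n t ih =>
    cases n with
    | none => simpa [pvVals_cons] using ih a b
    | some s =>
      cases h : PySem.Int.ofStr? s with
      | none => simp [List.foldl, h, ih a b, pvVals_cons]
      | some v => simp [List.foldl, h, ih (min a v) (max b v), pvVals_cons]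

-- B's fold from the initial none state
theorem bfold_none (names : List (Option String)) :
    names.foldl (fun mm name =>
      match name with
      | none => mm
      | some s =>
        match PySem.Int.ofStr? s with
        | none => mm
        | some v =>
          match mm with
          | none => some (v, v)
          | some (a, b) => some (min a v, max b v)) none =
      (match pvVals names with
       | [] => none
       | v :: t => some (t.foldl min v, t.foldl max v)) := by
  induction names with
  | nil => simp [pvVals]
  | cons n t ih =>
    cases n with
    | none => simpa [pvVals_cons] using ih
    | some s =>
      cases h : PySem.Int.ofStr? s with
      | none => simp [List.foldl, h, ih, pvVals_cons]
      | some v => simp [List.foldl, h, bfold_some t v v, pvVals_cons]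

-- ===== VERDICT (by name: the statement is the Claim_ definition above) =====
theorem frame_range_from_names_py_spec : Claim_equal_frame_range_from_names_py := by
  intro names _
  unfold Spec_frame_range_from_names_py frame_range_from_names_py frame_range_from_names_py_alt
  rw [frames_eq_vals, bfold_none]
  simp only [List.nil_append]
  cases hv : pvVals names with
  | nil => cases names <;> simp
  | cons v t =>
    have hne : names ≠ [] := by
      intro h; rw [h] at hv; simp [pvVals] at hv
    simp [hne, PySem.List.min?_id_cons, PySem.List.max?_id_cons]
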